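-- pv_equiv track=rewrite | github.com/vladalvl/homeworks | lesson_11/11_1.py | geom_progression
-- ===== SOURCE A (Python) =====
-- def geom_progression(number: int, q: int, length_progression: int):
--     counter = 1
--     while length_progression > 0:
--         if counter != 0:
--             number *= q
--             length_progression -= 1
--             counter += 1
--             yield number
--         else:
--             length_progression -= 1
--             counter += 1
--             yield number
-- ===== SOURCE B (Python) =====
-- def geom_progression(number: int, q: int, length_progression: int):
--     for i in range(1, length_progression + 1):
--         yield number * q ** i
-- ===== Notes on version B (the rewrite author's own statement) =====
-- stated objective: simpler
-- what changed: Replaced the while-loop with a mutating accumulator and a dead counter branch by an index-driven loop yielding the closed form number*q**i directly.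
import Mathlib
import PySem

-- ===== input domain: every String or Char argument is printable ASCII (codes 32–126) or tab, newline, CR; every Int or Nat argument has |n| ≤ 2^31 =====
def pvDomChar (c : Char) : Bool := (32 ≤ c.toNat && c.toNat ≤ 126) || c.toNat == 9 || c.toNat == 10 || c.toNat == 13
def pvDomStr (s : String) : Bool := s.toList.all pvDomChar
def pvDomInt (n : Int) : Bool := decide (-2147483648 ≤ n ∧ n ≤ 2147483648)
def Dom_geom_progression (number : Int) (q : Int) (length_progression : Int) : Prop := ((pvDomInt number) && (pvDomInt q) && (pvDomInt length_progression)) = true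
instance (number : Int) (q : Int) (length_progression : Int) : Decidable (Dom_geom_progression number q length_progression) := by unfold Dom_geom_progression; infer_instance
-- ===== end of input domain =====

-- B replaces A's running-product while-loop (with its dead counter branch) by an index loop computing each term as number * q^i directly (objective: simpler; not faster on large inputs).

-- ===== PORT A =====
-- while-loop of A: state (number, length_progression, counter); counter starts at 1 and only grows
def geomLoop (number : Int) (q : Int) (length_progression : Int) (counter : Int) : List Int :=
  if _h : length_progression > 0 then
    if counter ≠ 0 then
      (number * q) :: geomLoop (number * q) q (length_progression - 1) (counter + 1)
    else
      number :: geomLoop number q (length_progression - 1) (counter + 1)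
  else []
termination_by length_progression.toNat
decreasing_by all_goals omega

def geom_progression (number : Int) (q : Int) (length_progression : Int) : List Int :=
  geomLoop number q length_progression 1

-- ===== PORT B =====
def geom_progression_alt (number : Int) (q : Int) (length_progression : Int) : List Int :=
  (PySem.List.pyRange 1 (length_progression + 1) 1).map (fun i => number * q ^ i.toNat)

-- ===== PRECONDITION & SPEC =====
def Spec_geom_progression (number : Int) (q : Int) (length_progression : Int) (out : List Int) : Prop := out = geom_progression_alt number q length_progression
instance (number : Int) (q : Int) (length_progression : Int) (out : List Int) : Decidable (Spec_geom_progression number q length_progression out) := by unfold Spec_geom_progression; infer_instance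

-- ===== CLAIM (what is proved, stated in full; the proofs are below) =====
def Claim_equal_geom_progression : Prop := ∀ (number : Int) (q : Int) (length_progression : Int), Dom_geom_progression number q length_progression → Spec_geom_progression number q length_progression (geom_progression number q length_progression)

-- ===== LEMMAS AND PROOFS =====

-- ===== VERDICT (by name: the statement is the Claim_ definition above) =====
-- Both sides equal the canonical list (List.range L.toNat).map (fun k => number * q^(k+1)).
theorem geomLoop_eq (q : Int) : ∀ (fuel : Nat) (number L c : Int), L.toNat = fuel → 0 < c →
    geomLoop number q L c = (List.range fuel).map (fun k => number * q ^ (k + 1)) := by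
  intro fuel
  induction fuel with
  | zero =>
    intro number L c hf _
    rw [geomLoop]
    simp [show ¬ L > 0 by omega]
  | succ n ih =>
    intro number L c hf hc
    rw [geomLoop]
    rw [dif_pos (by omega : L > 0), if_pos (by omega : c ≠ 0)]
    rw [ih (number * q) (L - 1) (c + 1) (by omega) (by omega)]
    rw [List.range_succ_eq_map, List.map_cons, List.map_map]
    refine List.cons_eq_cons.mpr ⟨by ring, ?_⟩
    apply List.map_congr_left
    intro k _
    simp only [Function.comp_apply, Nat.succ_eq_add_one]
    ring

theorem alt_eq (number q L : Int) :
    geom_progression_alt number q L = (List.range L.toNat).map (fun k => number * q ^ (k + 1)) := by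
  unfold geom_progression_alt
  rw [PySem.List.pyRange_one]
  rw [show (L + 1 - 1) = L by ring]
  rw [List.map_map]
  apply List.map_congr_left
  intro k hk
  simp only [Function.comp]
  congr 2
  omega

theorem geom_progression_spec : Claim_equal_geom_progression := by
  intro number q L _
  unfold Spec_geom_progression geom_progression
  rw [alt_eq, geomLoop_eq q L.toNat number L 1 rfl (by omega)]
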